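-- pv_equiv track=rewrite | github.com/foryourselfand/programming_lab1_solver | solvers/first_solver.py | arr_raw_fill
-- ===== SOURCE A (Python) =====
-- def arr_raw_fill(start_number: int, end_number: int, even_flag: bool, odd_flag: bool, order: str) -> str:
--     step = 1
--     if even_flag or odd_flag:
--         step = 2
--
--         mod = 0 if even_flag else 1
--         start_number += abs(mod - (start_number % 2))
--         end_number -= abs(mod - (end_number % 2))
--
--     arr = [str(elem) for elem in range(start_number, end_number + 1, step)]
--
--     if order == 'убывания':
--         arr = arr[::-1]
--
--     numbers_with_dot = ', '.join(arr)
--     numbers_in_brackets = '{' + numbers_with_dot + '}'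
--     return numbers_in_brackets
-- ===== SOURCE B (Python) =====
-- def arr_raw_fill(start_number: int, end_number: int, even_flag: bool, odd_flag: bool, order: str) -> str:
--     filtering = even_flag or odd_flag
--     mod = 0 if even_flag else 1
--     arr = [str(n) for n in range(start_number, end_number + 1)
--            if not filtering or n % 2 == mod]
--     if order == 'убывания':
--         arr.reverse()
--     return '{' + ', '.join(arr) + '}'
-- ===== Notes on version B (the rewrite author's own statement) =====
-- stated objective: simpler
-- what changed: B drops A's endpoint-adjustment arithmetic (abs of modulo differences) and step-2 range: it walks the full step-1 range once and keeps each number by a per-element parity predicate, then reverses if descending.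
import Mathlib
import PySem

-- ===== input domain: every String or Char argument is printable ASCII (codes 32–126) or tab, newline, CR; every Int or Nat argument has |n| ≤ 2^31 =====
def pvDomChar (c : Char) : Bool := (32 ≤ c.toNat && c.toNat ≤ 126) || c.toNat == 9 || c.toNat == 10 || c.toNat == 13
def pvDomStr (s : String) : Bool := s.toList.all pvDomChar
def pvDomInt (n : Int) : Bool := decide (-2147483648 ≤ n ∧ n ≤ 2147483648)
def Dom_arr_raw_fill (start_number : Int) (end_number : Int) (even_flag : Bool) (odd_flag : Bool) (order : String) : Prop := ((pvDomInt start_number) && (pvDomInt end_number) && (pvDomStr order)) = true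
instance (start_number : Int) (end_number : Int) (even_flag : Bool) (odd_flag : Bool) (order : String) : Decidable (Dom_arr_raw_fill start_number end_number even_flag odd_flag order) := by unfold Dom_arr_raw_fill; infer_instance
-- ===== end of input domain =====

-- B filters the full step-1 range with a per-element parity predicate instead of A's
-- endpoint adjustment + step-2 range; objective: simpler (no abs/mod endpoint arithmetic).

-- ===== PORT A =====
def arr_raw_fill (start_number : Int) (end_number : Int) (even_flag : Bool) (odd_flag : Bool) (order : String) : String :=
  -- step = 1; if even_flag or odd_flag: step = 2; adjust both endpoints by abs(mod - (x % 2))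
  let sse : Int × Int × Int :=
    if even_flag || odd_flag then
      let md : Int := if even_flag then 0 else 1
      (start_number + |md - PySem.Int.mod start_number 2|,
       end_number - |md - PySem.Int.mod end_number 2|, 2)
    else (start_number, end_number, 1)
  let arr := (PySem.List.pyRange sse.1 (sse.2.1 + 1) sse.2.2).map (fun elem => PySem.Int.toStr elem)
  let arr := if order == "убывания" then arr.reverse else arr
  let numbers_with_dot := PySem.Str.join ", " arr
  "{" ++ numbers_with_dot ++ "}"

-- ===== PORT B =====
def arr_raw_fill_alt (start_number : Int) (end_number : Int) (even_flag : Bool) (odd_flag : Bool) (order : String) : String :=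
  let filtering := even_flag || odd_flag
  let md : Int := if even_flag then 0 else 1
  let arr := ((PySem.List.pyRange start_number (end_number + 1) 1).filter
      (fun n => !filtering || (PySem.Int.mod n 2 == md))).map (fun n => PySem.Int.toStr n)
  let arr := if order == "убывания" then arr.reverse else arr
  "{" ++ PySem.Str.join ", " arr ++ "}"

-- ===== PRECONDITION & SPEC =====
def Spec_arr_raw_fill (start_number : Int) (end_number : Int) (even_flag : Bool) (odd_flag : Bool) (order : String) (out : String) : Prop := out = arr_raw_fill_alt start_number end_number even_flag odd_flag order
instance (start_number : Int) (end_number : Int) (even_flag : Bool) (odd_flag : Bool) (order : String) (out : String) : Decidable (Spec_arr_raw_fill start_number end_number even_flag odd_flag order out) := by unfold Spec_arr_raw_fill; infer_instance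

-- ===== CLAIM (what is proved, stated in full; the proofs are below) =====
def Claim_equal_arr_raw_fill : Prop := ∀ (start_number : Int) (end_number : Int) (even_flag : Bool) (odd_flag : Bool) (order : String), Dom_arr_raw_fill start_number end_number even_flag odd_flag order → Spec_arr_raw_fill start_number end_number even_flag odd_flag order (arr_raw_fill start_number end_number even_flag odd_flag order)

-- ===== LEMMAS AND PROOFS =====

theorem pvRange_two_nil {a b : Int} (h : b ≤ a) : PySem.List.pyRange a b 2 = [] := by
  rw [PySem.List.pyRange_of_pos _ _ (by norm_num : (0:Int) < 2)]
  simp [show ¬ a < b by omega]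

theorem pvRange_two_cons {a b : Int} (h : a < b) :
    PySem.List.pyRange a b 2 = a :: PySem.List.pyRange (a + 2) b 2 := by
  rw [PySem.List.pyRange_of_pos _ _ (by norm_num : (0:Int) < 2),
      PySem.List.pyRange_of_pos _ _ (by norm_num : (0:Int) < 2)]
  by_cases h2 : a + 2 < b
  · have hc : ((b - a + 2 - 1) / 2).toNat = ((b - (a + 2) + 2 - 1) / 2).toNat + 1 := by omega
    rw [if_pos h, if_pos h2, hc, List.range_succ_eq_map]
    simp only [List.map_cons, List.map_map]
    congr 1
    · norm_num
    · apply List.map_congr_left; intro k _; simp [Function.comp]; ring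
  · have hc : ((b - a + 2 - 1) / 2).toNat = 1 := by omega
    rw [if_pos h, if_neg h2, hc]
    simp

theorem pvAbs01 {a b : Int} (ha : a = 0 ∨ a = 1) (hb : b = 0 ∨ b = 1) :
    |a - b| = if a = b then 0 else 1 := by
  rcases ha with ha | ha <;> rcases hb with hb | hb <;> subst ha <;> subst hb <;> norm_num

theorem pvFilterParity (md : Int) (hm : md = 0 ∨ md = 1) :
    ∀ (N : Nat) (s e : Int), (e + 1 - s).toNat ≤ N →
    List.filter (fun n => PySem.Int.mod n 2 == md) (PySem.List.pyRange s (e + 1) 1)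
      = PySem.List.pyRange (s + |md - PySem.Int.mod s 2|)
          ((e - |md - PySem.Int.mod e 2|) + 1) 2 := by
  intro N
  induction N with
  | zero =>
    intro s e h
    have hse : e < s := by omega
    have h1 : (0:Int) ≤ |md - PySem.Int.mod s 2| := abs_nonneg _
    have h2 : (0:Int) ≤ |md - PySem.Int.mod e 2| := abs_nonneg _
    rw [PySem.List.pyRange_one_eq_nil (by omega), pvRange_two_nil (by omega)]
    simp
  | succ N ih =>
    intro s e h
    by_cases hse : e < s
    · have h1 : (0:Int) ≤ |md - PySem.Int.mod s 2| := abs_nonneg _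
      have h2 : (0:Int) ≤ |md - PySem.Int.mod e 2| := abs_nonneg _
      rw [PySem.List.pyRange_one_eq_nil (by omega), pvRange_two_nil (by omega)]
      simp
    · have hms : PySem.Int.mod s 2 = s % 2 := PySem.Int.mod_eq_emod_of_pos (by norm_num)
      have hms1 : PySem.Int.mod (s + 1) 2 = (s + 1) % 2 := PySem.Int.mod_eq_emod_of_pos (by norm_num)
      have hme : PySem.Int.mod e 2 = e % 2 := PySem.Int.mod_eq_emod_of_pos (by norm_num)
      have hs2 : s % 2 = 0 ∨ s % 2 = 1 := Int.emod_two_eq_zero_or_one s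
      have hs12 : (s + 1) % 2 = 0 ∨ (s + 1) % 2 = 1 := Int.emod_two_eq_zero_or_one _
      have he2 : e % 2 = 0 ∨ e % 2 = 1 := Int.emod_two_eq_zero_or_one e
      have hflip : (s + 1) % 2 ≠ s % 2 := by omega
      rw [PySem.List.pyRange_one_cons (by omega : s < e + 1), List.filter_cons]
      by_cases hp : PySem.Int.mod s 2 = md
      · rw [if_pos (by simp only [beq_iff_eq]; exact hp), ih (s + 1) e (by omega)]
        have habs_s : |md - PySem.Int.mod s 2| = 0 := by
          rw [pvAbs01 hm (hms ▸ hs2), if_pos hp.symm]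
        have habs_s1 : |md - PySem.Int.mod (s + 1) 2| = 1 := by
          rw [pvAbs01 hm (hms1 ▸ hs12), if_neg (by rw [hms1]; omega)]
        have hsmd : s % 2 = md := by rw [hms] at hp; exact hp
        have he' : s < (e - |md - PySem.Int.mod e 2|) + 1 := by
          rw [pvAbs01 hm (hme ▸ he2)]
          split_ifs with hq
          · omega
          · omega
        rw [habs_s, habs_s1, add_zero, show s + 1 + 1 = s + 2 by ring,
            pvRange_two_cons he']
      · rw [if_neg (by simp only [beq_iff_eq]; exact hp), ih (s + 1) e (by omega)]
        have habs_s : |md - PySem.Int.mod s 2| = 1 := by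
          rw [pvAbs01 hm (hms ▸ hs2), if_neg (fun hq => hp hq.symm)]
        have habs_s1 : |md - PySem.Int.mod (s + 1) 2| = 0 := by
          rw [pvAbs01 hm (hms1 ▸ hs12), if_pos (by rw [hms1]; rw [hms] at hp; omega)]
        rw [habs_s, habs_s1]
        norm_num

-- ===== VERDICT (by name: the statement is the Claim_ definition above) =====
theorem arr_raw_fill_spec : Claim_equal_arr_raw_fill := by
  intro s e ev od order _
  unfold Spec_arr_raw_fill arr_raw_fill arr_raw_fill_alt
  by_cases hf : ev || od
  · have hkey := pvFilterParity (if ev then 0 else 1) (by split_ifs <;> simp)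
      ((e + 1 - s).toNat) s e (le_refl _)
    simp only [hf, Bool.not_true, Bool.false_or, if_true]
    rw [hkey]
  · simp only [hf, Bool.not_false, Bool.true_or, List.filter_true]
    rfl
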